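-- pv_equiv track=rewrite | github.com/gayoungpark/aoc2019 | 12.py | part2
-- ===== SOURCE A (Python) =====
-- from functools import reduce
-- from itertools import combinations
-- from math import gcd
--
-- class Moon:
--     def __init__(self, pos, vel):
--         self.pos = pos
--         self.vel = vel
--
--     def __repr__(self):
--         return f'pos={self.pos}, vel={self.vel}'
--
-- def part2(coords):
--     repeats = []
--
--     for axis in range(len(coords[0])):
--         moons = [
--             Moon([coord[axis]], [0])
--             for coord in coords
--         ]
--
--         state_to_steps = {}
--         steps = 0
--         while True:
--             state = tuple([m.pos[0] for m in moons] + [m.vel[0] for m in moons])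
--             if state in state_to_steps:
--                 break
--             state_to_steps[state] = steps
--
--             update_velocity(moons)
--             for moon in moons:
--                 apply_velocity(moon)
--             steps += 1
--
--         repeats.append(steps)
--
--     return lcm(repeats)
--
-- def update_velocity(moons):
--     for m1, m2 in list(combinations(moons, 2)):
--         for i in range(len(m1.pos)):
--             pos1, pos2 = m1.pos[i], m2.pos[i]
--             if pos1 > pos2:
--                 m1.vel[i] -= 1
--                 m2.vel[i] += 1
--             elif pos1 < pos2:
--                 m1.vel[i] += 1
--                 m2.vel[i] -= 1
--     return
--
-- def apply_velocity(moon):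
--     for i in range(len(moon.pos)):
--         moon.pos[i] += moon.vel[i]
--     return
--
-- def lcm(nums):
--     return reduce(lambda x, y: x * y // gcd(x, y), nums)
-- ===== SOURCE B (Python) =====
-- from math import gcd
--
-- def part2(coords):
--     total = 1
--     for axis in range(len(coords[0])):
--         init = [c[axis] for c in coords]
--         ps = list(init)
--         vs = [0] * len(ps)
--         steps = 0
--         while True:
--             vs = [v + sum(1 for q in ps if q > p) - sum(1 for q in ps if q < p)
--                   for p, v in zip(ps, vs)]
--             ps = [p + v for p, v in zip(ps, vs)]
--             steps += 1
--             if ps == init and all(v == 0 for v in vs):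
--                 break
--         total = total * steps // gcd(total, steps)
--     return total
-- ===== Notes on version B (the rewrite author's own statement) =====
-- stated objective: simpler
-- what changed: Per axis B keeps plain position/velocity lists and a fixed copy of the initial state, stops when the simulation first returns to that initial state (no Moon objects, no dict of seen states), computes each velocity kick by counting larger/smaller positions instead of mutating over all combinations pairs, and accumulates the running LCM instead of building a list and reducing it.
import Mathlib
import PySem

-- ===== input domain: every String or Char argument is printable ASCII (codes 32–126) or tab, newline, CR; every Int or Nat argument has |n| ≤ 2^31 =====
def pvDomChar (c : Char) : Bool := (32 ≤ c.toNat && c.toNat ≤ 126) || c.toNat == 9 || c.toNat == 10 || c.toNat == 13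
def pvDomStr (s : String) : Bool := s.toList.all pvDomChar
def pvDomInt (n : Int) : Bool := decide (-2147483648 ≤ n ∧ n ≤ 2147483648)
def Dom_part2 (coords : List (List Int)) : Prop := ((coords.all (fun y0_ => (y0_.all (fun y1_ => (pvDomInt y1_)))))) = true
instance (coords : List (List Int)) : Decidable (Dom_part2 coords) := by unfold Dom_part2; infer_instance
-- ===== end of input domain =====

-- B replaces A's Moon objects, per-step dict of seen states and final reduce-lcm by plain
-- position/velocity lists compared against a fixed copy of the initial state, per-moon
-- counting gravity and a running lcm accumulator (objective: simpler).
-- Both loops are unbounded in Python ('while True'); the ports run them under the same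
-- large fuel bound pvFuel, which only makes the recursion total.

-- ===== PORT A =====
-- combinations(range(n), 2) in the order itertools.combinations visits the moon pairs
def pvCombs (n : Nat) : List (Nat × Nat) :=
  (List.range n).flatMap (fun i => ((List.range n).filter (fun j => i < j)).map (fun j => (i, j)))

-- body of update_velocity for one pair (m1, m2) of moon indices (each moon = (pos, vel))
def pvUpd (cur : List (Int × Int)) (ij : Nat × Nat) : List (Int × Int) :=
  let p1 := (cur.getD ij.1 (0, 0)).1
  let p2 := (cur.getD ij.2 (0, 0)).1
  if p1 > p2 then
    (cur.modify ij.1 (fun m => (m.1, m.2 - 1))).modify ij.2 (fun m => (m.1, m.2 + 1))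
  else if p1 < p2 then
    (cur.modify ij.1 (fun m => (m.1, m.2 + 1))).modify ij.2 (fun m => (m.1, m.2 - 1))
  else cur

def pvUpdateVelocity (ms : List (Int × Int)) : List (Int × Int) :=
  (pvCombs ms.length).foldl pvUpd ms

-- apply_velocity over every moon
def pvApplyVelocity (ms : List (Int × Int)) : List (Int × Int) :=
  ms.map (fun m => (m.1 + m.2, m.2))

-- state = tuple([m.pos[0] for m in moons] + [m.vel[0] for m in moons])
def pvStateOf (ms : List (Int × Int)) : List Int :=
  ms.map (·.1) ++ ms.map (·.2)

def pvFuel : Nat := 1099511627776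

-- the 'while True' loop of A, totalised with fuel
def pvLoopA (fuel : Nat) (ms : List (Int × Int)) (d : PySem.Dict (List Int) Int) (steps : Int) : Int :=
  match fuel with
  | 0 => steps
  | f + 1 =>
    let st := pvStateOf ms
    if (d.get? st).isSome then steps
    else pvLoopA f (pvApplyVelocity (pvUpdateVelocity ms)) (d.insert st steps) (steps + 1)

def part2 (coords : List (List Int)) : Int :=
  let first := (PySem.List.pyGet? coords 0).getD []
  let repeats := (PySem.List.pyRange 0 (first.length : Int) 1).foldl (fun acc axis =>
      acc ++ [pvLoopA pvFuel
        (coords.map (fun coord => ((PySem.List.pyGet? coord axis).getD 0, (0 : Int))))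
        PySem.Dict.empty 0]) []
  -- lcm(repeats) = reduce(lambda x, y: x * y // gcd(x, y), repeats); empty repeats raise in Python
  match repeats with
  | [] => 0
  | r :: rest => rest.foldl (fun x y => PySem.Int.floordiv (x * y) (Int.gcd x y)) r

-- ===== PORT B =====
-- sum(1 for q in ps if q > p) and sum(1 for q in ps if q < p)
def pvCountGt (ps : List Int) (p : Int) : Int := ((ps.filter (fun q => p < q)).length : Int)
def pvCountLt (ps : List Int) (p : Int) : Int := ((ps.filter (fun q => q < p)).length : Int)

-- one simulation step of Source B: new velocities by counting, then new positions
def pvStepB (ps vs : List Int) : List Int × List Int :=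
  let vs' := (ps.zip vs).map (fun pv => pv.2 + pvCountGt ps pv.1 - pvCountLt ps pv.1)
  let ps' := (ps.zip vs').map (fun pv => pv.1 + pv.2)
  (ps', vs')

-- the 'while True' loop of Source B, totalised with the same fuel
def pvLoopB (fuel : Nat) (init ps vs : List Int) (steps : Int) : Int :=
  match fuel with
  | 0 => steps
  | f + 1 =>
    let s := pvStepB ps vs
    if s.1 == init && s.2.all (· == 0) then steps + 1
    else pvLoopB f init s.1 s.2 (steps + 1)

def part2_alt (coords : List (List Int)) : Int :=
  let first := (PySem.List.pyGet? coords 0).getD []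
  (PySem.List.pyRange 0 (first.length : Int) 1).foldl (fun total axis =>
    let init := coords.map (fun c => (PySem.List.pyGet? c axis).getD 0)
    let steps := pvLoopB pvFuel init init (List.replicate coords.length 0) 0
    PySem.Int.floordiv (total * steps) (Int.gcd total steps)) 1

-- ===== PRECONDITION & SPEC =====
-- Pre_ excludes exactly the inputs on which Python A raises: empty coords (coords[0] is an
-- IndexError), an empty first row (reduce over the empty repeats list is a TypeError), and
-- ragged inputs with a row shorter than the first one (coord[axis] is an IndexError).
def Pre_part2 (coords : List (List Int)) : Prop :=
  coords ≠ [] ∧ coords.headD [] ≠ [] ∧ ∀ c ∈ coords, (coords.headD []).length ≤ c.length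
instance (coords : List (List Int)) : Decidable (Pre_part2 coords) := by
  unfold Pre_part2; infer_instance
def pvWitness_part2 : List (List Int) := [[3, 1], [5, 2]]

def Spec_part2 (coords : List (List Int)) (out : Int) : Prop := out = part2_alt coords
instance (coords : List (List Int)) (out : Int) : Decidable (Spec_part2 coords out) := by
  unfold Spec_part2; infer_instance

-- ===== CLAIM (what is proved, stated in full; the proofs are below) =====
def Claim_equal_part2 : Prop :=
  ∀ (coords : List (List Int)), Dom_part2 coords → Pre_part2 coords →
    Spec_part2 coords (part2 coords)
-- ===== LEMMAS AND PROOFS =====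

-- sign of a difference, the per-pair velocity kick
def pvSgn (x : Int) : Int := if 0 < x then 1 else if x < 0 then -1 else 0

-- contribution of the pair x to the velocity of moon t, positions read through pos
def pvContrib (pos : Nat → Int) (t : Nat) (x : Nat × Nat) : Int :=
  (if t = x.1 then pvSgn (pos x.2 - pos x.1) else 0) +
  (if t = x.2 then pvSgn (pos x.1 - pos x.2) else 0)

-- the trajectory of Source B's per-axis simulation
def pvTraj (init : List Int) : Nat → List Int × List Int
  | 0 => (init, List.replicate init.length 0)
  | k + 1 => pvStepB (pvTraj init k).1 (pvTraj init k).2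

lemma pvSgn_zero : pvSgn 0 = 0 := by simp [pvSgn]

lemma sum_map_add {α : Type} (l : List α) (f g : α → Int) :
    (l.map (fun a => f a + g a)).sum = (l.map f).sum + (l.map g).sum := by
  induction l with
  | nil => simp
  | cons a l ih => simp [ih]; ring

lemma sum_map_flatMap {α β : Type} (l : List α) (f : α → List β) (g : β → Int) :
    ((l.flatMap f).map g).sum = (l.map (fun a => ((f a).map g).sum)).sum := by
  induction l with
  | nil => simp
  | cons a l ih => simp [List.flatMap_cons, ih]

lemma sum_ite_range (n t : Nat) (c : Int) (ht : t < n) :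
    ((List.range n).map (fun i => if t = i then c else 0)).sum = c := by
  induction n with
  | zero => omega
  | succ n ih =>
    rw [List.range_succ]
    by_cases h : t < n
    · simp [ih h]; omega
    · have : t = n := by omega
      subst this
      have : ((List.range t).map (fun i => if t = i then c else 0)).sum = 0 := by
        apply List.sum_eq_zero; intro x hx
        simp only [List.mem_map, List.mem_range] at hx
        obtain ⟨i, hi, rfl⟩ := hx
        simp [show t ≠ i by omega]
      simp [this]

lemma mem_pvCombs {n : Nat} {x : Nat × Nat} (h : x ∈ pvCombs n) : x.1 < x.2 ∧ x.2 < n := by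
  simp only [pvCombs, List.mem_flatMap, List.mem_map, List.mem_filter, List.mem_range] at h
  obtain ⟨i, hi, j, ⟨hj, hij⟩, rfl⟩ := h
  simp_all [decide_eq_true_eq]

lemma pvCombs_sum_ge (pos : Nat → Int) (n t : Nat) (ht : n ≤ t) :
    ((pvCombs n).map (pvContrib pos t)).sum = 0 := by
  apply List.sum_eq_zero; intro x hx
  simp only [List.mem_map] at hx
  obtain ⟨y, hy, rfl⟩ := hx
  have := mem_pvCombs hy
  simp [pvContrib, show t ≠ y.1 by omega, show t ≠ y.2 by omega]

lemma pvCombs_succ_sum (pos : Nat → Int) (n t : Nat) :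
    ((pvCombs (n + 1)).map (pvContrib pos t)).sum =
      ((pvCombs n).map (pvContrib pos t)).sum +
      ((List.range n).map (fun i => pvContrib pos t (i, n))).sum := by
  have hnil : ((List.range n ++ [n]).filter (fun j => decide (n < j))) = [] := by
    rw [List.filter_eq_nil_iff]
    intro j hj
    simp only [List.mem_append, List.mem_range, List.mem_singleton] at hj
    simp only [decide_eq_true_eq]
    omega
  unfold pvCombs
  rw [List.range_succ, List.flatMap_append]
  simp only [List.flatMap_cons, List.flatMap_nil, hnil, List.map_nil, List.append_nil]
  rw [sum_map_flatMap, sum_map_flatMap, ← sum_map_add]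
  congr 1
  apply List.map_congr_left
  intro i hi
  simp only [List.mem_range] at hi
  rw [List.filter_append, show ([n].filter (fun j => decide (i < j))) = [n] by simp [hi]]
  simp [List.map_append]

lemma pvCombs_sum (pos : Nat → Int) (n t : Nat) (ht : t < n) :
    ((pvCombs n).map (pvContrib pos t)).sum =
      ((List.range n).map (fun j => pvSgn (pos j - pos t))).sum := by
  induction n with
  | zero => omega
  | succ n ih =>
    rw [pvCombs_succ_sum, List.range_succ, List.map_append, List.sum_append]
    by_cases h : t < n
    · rw [ih h]
      have h2 : ((List.range n).map (fun i => pvContrib pos t (i, n))).sum =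
          ((List.range n).map (fun i => if t = i then pvSgn (pos n - pos t) else 0)).sum := by
        apply congrArg
        apply List.map_congr_left
        intro i hi
        simp only [List.mem_range] at hi
        by_cases hti : t = i
        · subst hti; simp [pvContrib, show t ≠ n by omega]
        · simp [pvContrib, hti, show t ≠ n by omega]
      rw [h2, sum_ite_range n t _ h]
      simp
    · have htn : t = n := by omega
      subst htn
      rw [pvCombs_sum_ge pos t t le_rfl]
      have h2 : ((List.range t).map (fun i => pvContrib pos t (i, t))).sum =
          ((List.range t).map (fun j => pvSgn (pos j - pos t))).sum := by
        apply congrArg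
        apply List.map_congr_left
        intro i hi
        simp only [List.mem_range] at hi
        simp [pvContrib, show t ≠ i by omega]
      rw [h2]
      simp [pvSgn_zero]

lemma getD_modify (l : List (Int × Int)) (i t : Nat) (f : Int × Int → Int × Int) :
    (l.modify i f).getD t (0, 0) =
      if i = t ∧ t < l.length then f (l.getD t (0, 0)) else l.getD t (0, 0) := by
  by_cases h : t < l.length
  · rw [List.getD_eq_getElem _ _ (by simpa using h), List.getD_eq_getElem _ _ h,
      List.getElem_modify]
    simp [h]
  · rw [List.getD_eq_default _ _ (by simpa using (not_lt.mp h)),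
      List.getD_eq_default _ _ (not_lt.mp h)]
    simp [h]

-- one pvUpd step characterised pointwise
lemma pvUpd_char (cur : List (Int × Int)) (x : Nat × Nat) (hx : x.1 ≠ x.2) :
    (pvUpd cur x).length = cur.length ∧
    (∀ t, ((pvUpd cur x).getD t (0, 0)).1 = (cur.getD t (0, 0)).1) ∧
    (∀ t, t < cur.length → ((pvUpd cur x).getD t (0, 0)).2 =
      (cur.getD t (0, 0)).2 + pvContrib (fun j => (cur.getD j (0, 0)).1) t x) := by
  obtain ⟨i, j⟩ := x
  simp only [pvUpd, pvContrib] at *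
  set p1 := (cur.getD i (0, 0)).1 with hp1
  set p2 := (cur.getD j (0, 0)).1 with hp2
  split_ifs with hgt hlt
  · refine ⟨by simp [List.length_modify], ?_, ?_⟩
    · intro t
      rw [getD_modify, getD_modify]
      split_ifs <;> simp
    · intro t ht
      rw [getD_modify, getD_modify]
      simp only [List.length_modify]
      rcases eq_or_ne t i with rfl | hti
      · simp [ht, hx, Ne.symm hx, pvSgn] <;> split_ifs <;> omega
      · rcases eq_or_ne t j with rfl | htj
        · simp [ht, Ne.symm hti, pvSgn] <;> split_ifs <;> omega
        · simp [Ne.symm hti, Ne.symm htj, hti, htj]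
  · refine ⟨by simp [List.length_modify], ?_, ?_⟩
    · intro t
      rw [getD_modify, getD_modify]
      split_ifs <;> simp
    · intro t ht
      rw [getD_modify, getD_modify]
      simp only [List.length_modify]
      rcases eq_or_ne t i with rfl | hti
      · simp [ht, hx, Ne.symm hx, pvSgn] <;> split_ifs <;> omega
      · rcases eq_or_ne t j with rfl | htj
        · simp [ht, Ne.symm hti, pvSgn] <;> split_ifs <;> omega
        · simp [Ne.symm hti, Ne.symm htj, hti, htj]
  · have hpe : p1 = p2 := by omega
    refine ⟨rfl, fun t => rfl, ?_⟩
    intro t ht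
    rcases eq_or_ne t i with rfl | hti
    · simp [hx, ← hpe, pvSgn]
    · rcases eq_or_ne t j with rfl | htj
      · simp [Ne.symm hx, hti, hpe, pvSgn]
      · simp [hti, htj]

lemma pvFold_char (L : List (Nat × Nat)) (cur : List (Int × Int))
    (hL : ∀ x ∈ L, x.1 ≠ x.2) :
    (L.foldl pvUpd cur).length = cur.length ∧
    (∀ t, ((L.foldl pvUpd cur).getD t (0, 0)).1 = (cur.getD t (0, 0)).1) ∧
    (∀ t, t < cur.length → ((L.foldl pvUpd cur).getD t (0, 0)).2 =
      (cur.getD t (0, 0)).2 + (L.map (pvContrib (fun j => (cur.getD j (0, 0)).1) t)).sum) := by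
  induction L generalizing cur with
  | nil => simp
  | cons x L ih =>
    have hx := hL x List.mem_cons_self
    obtain ⟨hu1, hu2, hu3⟩ := pvUpd_char cur x hx
    have hpos : (fun j => ((pvUpd cur x).getD j (0, 0)).1) =
        (fun j => (cur.getD j (0, 0)).1) := funext hu2
    obtain ⟨hf1, hf2, hf3⟩ := ih (pvUpd cur x) (fun y hy => hL y (List.mem_cons_of_mem x hy))
    simp only [List.foldl_cons]
    refine ⟨hf1.trans hu1, fun t => (hf2 t).trans (hu2 t), ?_⟩
    intro t ht
    rw [hf3 t (by omega), hpos, hu3 t ht]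
    simp only [List.map_cons, List.sum_cons]
    ring

lemma count_sub_eq_sum_sgn (ps : List Int) (p : Int) :
    pvCountGt ps p - pvCountLt ps p = (ps.map (fun q => pvSgn (q - p))).sum := by
  induction ps with
  | nil => simp [pvCountGt, pvCountLt]
  | cons q ps ih =>
    simp only [pvCountGt, pvCountLt, List.filter_cons, List.map_cons, List.sum_cons] at *
    by_cases h1 : p < q
    · simp [h1, show ¬ q < p by omega, pvSgn, show (0:Int) < q - p by omega] at *
      push_cast; push_cast at ih; omega
    · by_cases h2 : q < p
      · simp [h1, h2, pvSgn, show ¬ (0:Int) < q - p by omega, show q - p < 0 by omega] at *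
        push_cast; push_cast at ih; omega
      · simp [h1, h2, pvSgn, show ¬ (0:Int) < q - p by omega, show ¬ q - p < 0 by omega] at *
        omega

lemma map_range_getD {α β : Type} (ps : List α) (d : α) (f : α → β) :
    (List.range ps.length).map (fun j => f (ps.getD j d)) = ps.map f := by
  apply List.ext_getElem
  · simp
  · intro t h1 h2
    simp only [List.getElem_map, List.getElem_range]
    rw [List.getD_eq_getElem _ _ (by simpa using h2)]

-- A's combined velocity update + position update equals Source B's step, on zipped states
lemma stepA_eq_stepB (ps vs : List Int) (h : ps.length = vs.length) :
    pvApplyVelocity (pvUpdateVelocity (ps.zip vs)) =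
      (pvStepB ps vs).1.zip (pvStepB ps vs).2 := by
  have hzlen : (ps.zip vs).length = ps.length := by simp [List.length_zip, h]
  have hpos : ∀ j, ((ps.zip vs).getD j (0, 0)).1 = ps.getD j 0 := by
    intro j
    by_cases hj : j < ps.length
    · rw [List.getD_eq_getElem _ _ (by omega : j < (ps.zip vs).length),
        List.getD_eq_getElem _ _ hj, List.getElem_zip]
    · rw [List.getD_eq_default _ _ (by omega : (ps.zip vs).length ≤ j),
        List.getD_eq_default _ _ (by omega : ps.length ≤ j)]
  obtain ⟨hl, hfst, hsnd⟩ := pvFold_char (pvCombs (ps.zip vs).length) (ps.zip vs)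
    (fun x hx => (mem_pvCombs hx).1.ne)
  have hposf : (fun j => ((ps.zip vs).getD j (0, 0)).1) = (fun j => ps.getD j 0) :=
    funext hpos
  have hsum : ∀ t, t < ps.length →
      ((pvCombs (ps.zip vs).length).map
        (pvContrib (fun j => ((ps.zip vs).getD j (0, 0)).1) t)).sum =
      pvCountGt ps (ps.getD t 0) - pvCountLt ps (ps.getD t 0) := by
    intro t ht
    rw [hposf, hzlen, pvCombs_sum _ _ _ ht,
      map_range_getD ps 0 (fun q => pvSgn (q - ps.getD t 0)),
      ← count_sub_eq_sum_sgn]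
  have hul : (pvUpdateVelocity (ps.zip vs)).length = ps.length := by
    unfold pvUpdateVelocity; exact hl.trans hzlen
  have hufst : ∀ t, ((pvUpdateVelocity (ps.zip vs)).getD t (0, 0)).1 = ps.getD t 0 := by
    intro t; unfold pvUpdateVelocity; rw [hfst t, hpos t]
  have husnd : ∀ t, t < ps.length → ((pvUpdateVelocity (ps.zip vs)).getD t (0, 0)).2 =
      ((ps.zip vs).getD t (0, 0)).2 + pvCountGt ps (ps.getD t 0) - pvCountLt ps (ps.getD t 0) := by
    intro t ht
    unfold pvUpdateVelocity
    rw [hsnd t (by omega), hsum t ht]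
    ring
  have hvlen : ((ps.zip vs).map
      (fun pv => pv.2 + pvCountGt ps pv.1 - pvCountLt ps pv.1)).length = ps.length := by
    simp [hzlen]
  apply List.ext_getElem
  · simp only [pvApplyVelocity, pvStepB, List.length_map, List.length_zip, hul, hvlen]
    omega
  · intro t h1 h2
    have ht : t < ps.length := by
      simpa [pvApplyVelocity, hul] using h1
    have htv : t < vs.length := by omega
    have hr : (pvApplyVelocity (pvUpdateVelocity (ps.zip vs)))[t]'h1 =
        (((pvUpdateVelocity (ps.zip vs)).getD t (0, 0)).1 +
          ((pvUpdateVelocity (ps.zip vs)).getD t (0, 0)).2,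
         ((pvUpdateVelocity (ps.zip vs)).getD t (0, 0)).2) := by
      simp only [pvApplyVelocity, List.getElem_map]
      rw [List.getD_eq_getElem _ _ (by omega : t < (pvUpdateVelocity (ps.zip vs)).length)]
    have hget2 : ((ps.zip vs).getD t (0, 0)).2 = vs[t] := by
      rw [List.getD_eq_getElem _ _ (by omega : t < (ps.zip vs).length), List.getElem_zip]
    have hget1 : ps.getD t 0 = ps[t] := List.getD_eq_getElem _ _ ht
    rw [hr, hufst t, husnd t ht, hget1, hget2]
    simp only [pvStepB, List.getElem_zip, List.getElem_map]

lemma pvTraj_len (init : List Int) (k : Nat) :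
    (pvTraj init k).1.length = init.length ∧ (pvTraj init k).2.length = init.length := by
  induction k with
  | zero => simp [pvTraj]
  | succ k ih =>
    simp only [pvTraj, pvStepB, List.length_map, List.length_zip, ih.1, ih.2]
    omega

lemma pvStepB_inj (ps1 vs1 ps2 vs2 : List Int)
    (h1 : ps1.length = vs1.length) (h2 : ps2.length = vs2.length)
    (hl : ps1.length = ps2.length)
    (h : pvStepB ps1 vs1 = pvStepB ps2 vs2) : ps1 = ps2 ∧ vs1 = vs2 := by
  have len2 : ∀ (ps vs : List Int), ps.length = vs.length →
      ((pvStepB ps vs).2).length = ps.length := by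
    intro ps vs hh; simp [pvStepB, List.length_zip, hh]
  have len1 : ∀ (ps vs : List Int), ps.length = vs.length →
      ((pvStepB ps vs).1).length = ps.length := by
    intro ps vs hh; simp [pvStepB, List.length_zip, hh]
  have e2 : ∀ (ps vs : List Int) (hh : ps.length = vs.length) (t : Nat) (ht : t < ps.length),
      ((pvStepB ps vs).2)[t]'(by rw [len2 ps vs hh]; omega) =
        vs[t]'(by omega) + pvCountGt ps (ps[t]'ht) - pvCountLt ps (ps[t]'ht) := by
    intro ps vs hh t ht
    simp only [pvStepB, List.getElem_map, List.getElem_zip]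
  have e1 : ∀ (ps vs : List Int) (hh : ps.length = vs.length) (t : Nat) (ht : t < ps.length),
      ((pvStepB ps vs).1)[t]'(by rw [len1 ps vs hh]; omega) =
        ps[t]'ht + ((pvStepB ps vs).2)[t]'(by rw [len2 ps vs hh]; omega) := by
    intro ps vs hh t ht
    simp only [pvStepB, List.getElem_map, List.getElem_zip]
  have hfst : (pvStepB ps1 vs1).1 = (pvStepB ps2 vs2).1 := congrArg Prod.fst h
  have hsnd : (pvStepB ps1 vs1).2 = (pvStepB ps2 vs2).2 := congrArg Prod.snd h
  have hps : ps1 = ps2 := by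
    apply List.ext_getElem hl
    intro t ht ht'
    have a1 := e1 ps1 vs1 h1 t ht
    have a2 := e1 ps2 vs2 h2 t ht'
    have b1 : ((pvStepB ps1 vs1).1)[t]'(by rw [len1 ps1 vs1 h1]; omega) =
        ((pvStepB ps2 vs2).1)[t]'(by rw [len1 ps2 vs2 h2]; omega) :=
      List.getElem_of_eq hfst _
    have b2 : ((pvStepB ps1 vs1).2)[t]'(by rw [len2 ps1 vs1 h1]; omega) =
        ((pvStepB ps2 vs2).2)[t]'(by rw [len2 ps2 vs2 h2]; omega) :=
      List.getElem_of_eq hsnd _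
    rw [a1, a2, b2] at b1
    omega
  refine ⟨hps, ?_⟩
  subst hps
  apply List.ext_getElem (by omega)
  intro t ht ht'
  have a1 := e2 ps1 vs1 h1 t (by omega)
  have a2 := e2 ps1 vs2 h2 t (by omega)
  have b2 : ((pvStepB ps1 vs1).2)[t]'(by rw [len2 ps1 vs1 h1]; omega) =
      ((pvStepB ps1 vs2).2)[t]'(by rw [len2 ps1 vs2 h2]; omega) :=
    List.getElem_of_eq hsnd _
  rw [a1, a2] at b2
  omega

lemma pvTraj_cancel (init : List Int) (j k : Nat) (hjk : j ≤ k)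
    (h : pvTraj init j = pvTraj init k) : pvTraj init 0 = pvTraj init (k - j) := by
  induction j generalizing k with
  | zero => simpa using h
  | succ j ih =>
    obtain ⟨k', rfl⟩ : ∃ k', k = k' + 1 := ⟨k - 1, by omega⟩
    have hstep : pvStepB (pvTraj init j).1 (pvTraj init j).2 =
        pvStepB (pvTraj init k').1 (pvTraj init k').2 := h
    have l1 := pvTraj_len init j
    have l2 := pvTraj_len init k'
    obtain ⟨hp, hv⟩ := pvStepB_inj _ _ _ _ (l1.1.trans l1.2.symm) (l2.1.trans l2.2.symm)
      (l1.1.trans l2.1.symm) hstep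
    have : pvTraj init j = pvTraj init k' := Prod.ext hp hv
    have h0 := ih k' (by omega) this
    have : k' + 1 - (j + 1) = k' - j := by omega
    rw [this]
    exact h0

lemma stateOf_zip (ps vs : List Int) (h : ps.length = vs.length) :
    pvStateOf (ps.zip vs) = ps ++ vs := by
  simp only [pvStateOf]
  congr 1
  · simpa using List.map_fst_zip (l₁ := ps) (l₂ := vs) (le_of_eq h)
  · simpa using List.map_snd_zip (l₁ := ps) (l₂ := vs) (le_of_eq h.symm)

lemma state_inj (p1 v1 p2 v2 : List Int) (h1 : p1.length = v1.length)
    (h2 : p2.length = v2.length) (hl : p1.length = p2.length)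
    (h : pvStateOf (p1.zip v1) = pvStateOf (p2.zip v2)) : p1 = p2 ∧ v1 = v2 := by
  rw [stateOf_zip _ _ h1, stateOf_zip _ _ h2] at h
  exact List.append_inj h hl

lemma loop_eq (init : List Int) (f : Nat) : ∀ (k : Nat) (d : PySem.Dict (List Int) Int),
    (∀ st, (d.get? st).isSome = true ↔
      ∃ j < k, st = pvStateOf ((pvTraj init j).1.zip (pvTraj init j).2)) →
    (∀ i, 0 < i → i ≤ k → pvTraj init i ≠ pvTraj init 0) →
    pvLoopA f ((pvTraj init k).1.zip (pvTraj init k).2) d (k : Int) =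
      pvLoopB f init (pvTraj init k).1 (pvTraj init k).2 (k : Int) := by
  induction f with
  | zero => intro k d hd hne; rfl
  | succ f ih =>
    intro k d hd hne
    have lk := pvTraj_len init k
    have lk1 := pvTraj_len init (k + 1)
    have hkzip : (pvTraj init k).1.length = (pvTraj init k).2.length :=
      lk.1.trans lk.2.symm
    have hmem : ((d.get? (pvStateOf ((pvTraj init k).1.zip (pvTraj init k).2))).isSome)
        = false := by
      cases hb : (d.get? (pvStateOf ((pvTraj init k).1.zip (pvTraj init k).2))).isSome with
      | false => rfl
      | true =>
        exfalso
        obtain ⟨j, hj, hst⟩ := (hd _).mp hb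
        have lj := pvTraj_len init j
        obtain ⟨hp, hv⟩ := state_inj _ _ _ _ hkzip (lj.1.trans lj.2.symm)
          (lk.1.trans lj.1.symm) hst
        have hkj : pvTraj init k = pvTraj init j := Prod.ext hp hv
        have h0 := pvTraj_cancel init j k (by omega) hkj.symm
        exact (hne (k - j) (by omega) (by omega)) h0.symm
    have hstepA : pvApplyVelocity (pvUpdateVelocity ((pvTraj init k).1.zip (pvTraj init k).2))
        = (pvTraj init (k + 1)).1.zip (pvTraj init (k + 1)).2 := by
      rw [stepA_eq_stepB _ _ hkzip]; rfl
    simp only [pvLoopA, pvLoopB, hmem, Bool.false_eq_true, if_false]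
    rw [hstepA]
    have hTs : pvStepB (pvTraj init k).1 (pvTraj init k).2 = pvTraj init (k + 1) := rfl
    rw [hTs]
    by_cases hc : ((pvTraj init (k + 1)).1 == init &&
        (pvTraj init (k + 1)).2.all (· == 0)) = true
    · rw [if_pos hc]
      simp only [Bool.and_eq_true, beq_iff_eq, List.all_eq_true] at hc
      have hs2 : (pvTraj init (k + 1)).2 = List.replicate init.length 0 :=
        List.eq_replicate_iff.mpr ⟨lk1.2, fun b hb => by simpa using hc.2 b hb⟩
      have hT0 : pvTraj init (k + 1) = pvTraj init 0 := by
        rw [show pvTraj init 0 = (init, List.replicate init.length 0) from rfl]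
        exact Prod.ext hc.1 hs2
      cases f with
      | zero => rfl
      | succ f' =>
        simp only [pvLoopA]
        have hsome : (((d.insert (pvStateOf ((pvTraj init k).1.zip (pvTraj init k).2)) (k : Int)).get?
            (pvStateOf ((pvTraj init (k + 1)).1.zip (pvTraj init (k + 1)).2))).isSome) = true := by
          by_cases hks : pvStateOf ((pvTraj init (k + 1)).1.zip (pvTraj init (k + 1)).2) =
              pvStateOf ((pvTraj init k).1.zip (pvTraj init k).2)
          · rw [hks, PySem.Dict.get?_insert_self]; rfl
          · rw [PySem.Dict.get?_insert_of_ne _ _ hks]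
            refine (hd _).mpr ⟨0, ?_, by rw [hT0]⟩
            rcases Nat.eq_zero_or_pos k with rfl | hk
            · exact absurd (by rw [hT0]) hks
            · omega
        rw [hsome]
        simp
    · rw [if_neg hc]
      have hne' : ∀ i, 0 < i → i ≤ k + 1 → pvTraj init i ≠ pvTraj init 0 := by
        intro i hi hik
        rcases Nat.lt_or_ge i (k + 1) with hlt | hge
        · exact hne i hi (by omega)
        · have : i = k + 1 := by omega
          subst this
          intro heq
          apply hc
          rw [heq]
          simp [pvTraj, List.all_eq_true, List.mem_replicate]
      have hd' : ∀ st, (((d.insert (pvStateOf ((pvTraj init k).1.zip (pvTraj init k).2)) (k : Int)).get? st).isSome) = true ↔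
          ∃ j < k + 1, st = pvStateOf ((pvTraj init j).1.zip (pvTraj init j).2) := by
        intro st
        by_cases he : st = pvStateOf ((pvTraj init k).1.zip (pvTraj init k).2)
        · subst he
          rw [PySem.Dict.get?_insert_self]
          simp only [Option.isSome_some, true_iff]
          exact ⟨k, by omega, rfl⟩
        · rw [PySem.Dict.get?_insert_of_ne _ _ he, hd st]
          constructor
          · rintro ⟨j, hj, rfl⟩; exact ⟨j, by omega, rfl⟩
          · rintro ⟨j, hj, rfl⟩
            refine ⟨j, ?_, rfl⟩
            rcases Nat.lt_or_ge j k with h' | h'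
            · exact h'
            · exfalso
              have hjk : j = k := by omega
              subst hjk
              exact he rfl
      have := ih (k + 1) _ hd' hne'
      push_cast at this ⊢
      exact this

lemma axis_eq (init : List Int) :
    pvLoopA pvFuel (init.map (fun x => (x, (0 : Int)))) PySem.Dict.empty 0 =
      pvLoopB pvFuel init init (List.replicate init.length 0) 0 := by
  have hzip : init.map (fun x => (x, (0 : Int))) = init.zip (List.replicate init.length 0) := by
    induction init with
    | nil => rfl
    | cons a l ih => simp only [List.map_cons, List.length_cons, List.replicate_succ,
        List.zip_cons_cons, ih]
  have h0 := loop_eq init pvFuel 0 PySem.Dict.empty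
    (by intro st; simp [PySem.Dict.get?_empty])
    (by intro i hi hik; omega)
  simpa [pvTraj, hzip] using h0

lemma foldl_concat {α β : Type} (l : List α) (g : α → β) (acc : List β) :
    l.foldl (fun acc a => acc ++ [g a]) acc = acc ++ l.map g := by
  induction l generalizing acc with
  | nil => simp
  | cons a l ih => simp [ih]

-- ===== VERDICT (by name: the statement is the Claim_ definition above) =====
theorem part2_spec : Claim_equal_part2 := by
  unfold Claim_equal_part2
  intro coords hdom hpre
  unfold Spec_part2
  obtain ⟨hne, hfirst, -⟩ := hpre
  obtain ⟨c0, rest, rfl⟩ : ∃ c0 rest, coords = c0 :: rest := by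
    cases coords with
    | nil => exact absurd rfl hne
    | cons a l => exact ⟨a, l, rfl⟩
  have hget0 : (PySem.List.pyGet? (c0 :: rest) (0 : Int)).getD [] = c0 := by
    simp [PySem.List.pyGet?, PySem.List.pyIdx?]
  simp only [part2, part2_alt, hget0]
  rw [foldl_concat]
  simp only [List.nil_append]
  have hax : ∀ axis : Int,
      pvLoopA pvFuel ((c0 :: rest).map
        (fun coord => ((PySem.List.pyGet? coord (axis : Int)).getD 0, (0 : Int))))
        PySem.Dict.empty 0 =
      pvLoopB pvFuel ((c0 :: rest).map (fun c => (PySem.List.pyGet? c (axis : Int)).getD 0))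
        ((c0 :: rest).map (fun c => (PySem.List.pyGet? c (axis : Int)).getD 0))
        (List.replicate (c0 :: rest).length 0) 0 := by
    intro axis
    have hm : ((c0 :: rest).map
        (fun coord => ((PySem.List.pyGet? coord (axis : Int)).getD 0, (0 : Int)))) =
        ((c0 :: rest).map (fun c => (PySem.List.pyGet? c (axis : Int)).getD 0)).map
          (fun x => (x, (0 : Int))) := by
      rw [List.map_map]; rfl
    rw [hm, axis_eq, List.length_map]
  have hmapeq : (PySem.List.pyRange 0 (c0.length : Int) 1).map (fun (axis : Int) =>
      pvLoopA pvFuel ((c0 :: rest).map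
        (fun coord => ((PySem.List.pyGet? coord (axis : Int)).getD 0, (0 : Int))))
        PySem.Dict.empty 0) =
      (PySem.List.pyRange 0 (c0.length : Int) 1).map (fun (axis : Int) =>
      pvLoopB pvFuel ((c0 :: rest).map (fun c => (PySem.List.pyGet? c (axis : Int)).getD 0))
        ((c0 :: rest).map (fun c => (PySem.List.pyGet? c (axis : Int)).getD 0))
        (List.replicate (c0 :: rest).length 0) 0) :=
    List.map_congr_left (fun a _ => hax a)
  rw [hmapeq, ← List.foldl_map
    (f := fun (axis : Int) =>
      pvLoopB pvFuel ((c0 :: rest).map (fun c => (PySem.List.pyGet? c axis).getD 0))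
        ((c0 :: rest).map (fun c => (PySem.List.pyGet? c axis).getD 0))
        (List.replicate (c0 :: rest).length 0) 0)
    (g := fun x y => PySem.Int.floordiv (x * y) (Int.gcd x y))
    (l := PySem.List.pyRange 0 (c0.length : Int) 1) (init := (1 : Int))]
  cases hL : (PySem.List.pyRange 0 (c0.length : Int) 1).map (fun (axis : Int) =>
      pvLoopB pvFuel ((c0 :: rest).map (fun c => (PySem.List.pyGet? c (axis : Int)).getD 0))
        ((c0 :: rest).map (fun c => (PySem.List.pyGet? c (axis : Int)).getD 0))
        (List.replicate (c0 :: rest).length 0) 0) with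
  | nil =>
    exfalso
    have hlen0 : c0.length ≠ 0 := fun h => hfirst (List.length_eq_zero_iff.mp h)
    rw [PySem.List.pyRange_one_cons (by omega : (0 : Int) < (c0.length : Int))] at hL
    simp at hL
  | cons r rs =>
    simp only [List.foldl_cons]
    have h1r : PySem.Int.floordiv (1 * r) (Int.gcd 1 r) = r := by
      rw [one_mul, Int.one_gcd]
      rw [show ((1 : Nat) : Int) = 1 by rfl,
        PySem.Int.floordiv_eq_ediv_of_pos (by norm_num)]
      simp
    rw [h1r]
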